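-- pv_equiv track=rewrite | github.com/jamiehale/aoc2021 | 12/python/part2.py | doubled_already
-- ===== SOURCE A (Python) =====
-- def doubled_already(history):
--     counts = {}
--     for location in history:
--         if not location.isupper():
--             counts[location] = counts.get(location, 0) + 1
--             if counts[location] == 2:
--                 return True
--     return False
-- ===== SOURCE B (Python) =====
-- def doubled_already(history):
--     lowers = [x for x in history if not x.isupper()]
--     return len(set(lowers)) < len(lowers)
-- ===== Notes on version B (the rewrite author's own statement) =====
-- stated objective: idiomatic
-- what changed: Replaces the incremental per-location counter dictionary with an early-exit branch by materialising the list of non-uppercase locations once and detecting a duplicate by comparing its length with the size of its set.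
import Mathlib
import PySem

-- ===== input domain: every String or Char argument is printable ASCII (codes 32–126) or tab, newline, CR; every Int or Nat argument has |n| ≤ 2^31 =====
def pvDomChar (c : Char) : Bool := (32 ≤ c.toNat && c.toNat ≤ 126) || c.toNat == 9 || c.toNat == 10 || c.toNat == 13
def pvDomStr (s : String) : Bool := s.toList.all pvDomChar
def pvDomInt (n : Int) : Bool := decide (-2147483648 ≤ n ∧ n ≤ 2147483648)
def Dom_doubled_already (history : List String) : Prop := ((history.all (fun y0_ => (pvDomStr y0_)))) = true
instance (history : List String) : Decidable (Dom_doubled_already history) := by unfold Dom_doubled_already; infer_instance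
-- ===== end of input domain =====

-- B drops A's incremental counter dict and early exit: it filters the non-uppercase
-- locations once and compares list length with set size (idiomatic, same cost).

-- str.isupper() on the ASCII domain: at least one cased (letter) char and no lowercase char
def pyStrIsupper (s : String) : Bool :=
  (s.toList.any PySem.Chars.isalpha) && (s.toList.all (fun c => !PySem.Chars.islower c))

-- ===== PORT A =====
def pvLoopA : List String → PySem.Dict String Int → Bool
  | [], _ => false
  | location :: rest, counts =>
    if !(pyStrIsupper location) then
      let counts' := counts.insert location (counts.getD location 0 + 1)
      if counts'.getD location 0 == 2 then true
      else pvLoopA rest counts'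
    else pvLoopA rest counts

def doubled_already (history : List String) : Bool :=
  pvLoopA history PySem.Dict.empty

-- ===== PORT B =====
def doubled_already_alt (history : List String) : Bool :=
  let lowers := history.filter (fun x => !(pyStrIsupper x))
  decide ((PySem.Set.ofList lowers).length < lowers.length)

-- ===== PRECONDITION & SPEC =====
def Spec_doubled_already (history : List String) (out : Bool) : Prop := out = doubled_already_alt history
instance (history : List String) (out : Bool) : Decidable (Spec_doubled_already history out) := by unfold Spec_doubled_already; infer_instance

-- ===== CLAIM (what is proved, stated in full; the proofs are below) =====
def Claim_equal_doubled_already : Prop := ∀ (history : List String), Dom_doubled_already history → Spec_doubled_already history (doubled_already history)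

-- ===== LEMMAS AND PROOFS =====

theorem pvLoopA_eq (l : List String) : ∀ (p : List String) (counts : PySem.Dict String Int),
    (∀ x, counts.getD x 0 = (p.count x : Int)) → p.Nodup →
    pvLoopA l counts = !decide ((p ++ l.filter (fun x => !(pyStrIsupper x))).Nodup) := by
  induction l with
  | nil => intro p counts _ hp; simp [pvLoopA, hp]
  | cons loc rest ih =>
    intro p counts hc hp
    by_cases hu : pyStrIsupper loc = true
    · rw [show pvLoopA (loc :: rest) counts = pvLoopA rest counts by simp [pvLoopA, hu]]
      rw [show (loc :: rest).filter (fun x => !(pyStrIsupper x))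
            = rest.filter (fun x => !(pyStrIsupper x)) by simp [hu]]
      exact ih p counts hc hp
    · have hu' : pyStrIsupper loc = false := by simpa using hu
      by_cases hm : loc ∈ p
      · -- count already 1, new count 2: A returns true; duplicate on the right too
        have hcount : p.count loc = 1 := List.count_eq_one_of_mem hp hm
        rw [show pvLoopA (loc :: rest) counts
              = (if (counts.insert loc (counts.getD loc 0 + 1)).getD loc 0 == 2 then true
                 else pvLoopA rest (counts.insert loc (counts.getD loc 0 + 1))) by
            simp [pvLoopA, hu']]
        rw [PySem.Dict.getD_insert_self, hc loc, hcount]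
        rw [if_pos (by decide)]
        have hdup : ¬ (p ++ loc :: rest.filter (fun x => !(pyStrIsupper x))).Nodup := by
          intro hnd
          rcases List.nodup_append.mp hnd with ⟨_, _, hdisj⟩
          exact hdisj loc hm loc (by simp) rfl
        simp [hu', hdup]
      · -- fresh non-upper location: recurse with it appended
        have hcount : p.count loc = 0 := List.count_eq_zero.mpr hm
        rw [show pvLoopA (loc :: rest) counts
              = (if (counts.insert loc (counts.getD loc 0 + 1)).getD loc 0 == 2 then true
                 else pvLoopA rest (counts.insert loc (counts.getD loc 0 + 1))) by
            simp [pvLoopA, hu']]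
        rw [PySem.Dict.getD_insert_self, hc loc, hcount]
        rw [if_neg (by decide)]
        have hc' : ∀ x, (counts.insert loc (counts.getD loc 0 + 1)).getD x 0
            = ((p ++ [loc]).count x : Int) := by
          intro x
          rw [PySem.Dict.getD_insert]
          by_cases hx : x = loc
          · subst hx; simp [hc x, hcount]
          · simp [hx, hc x, Ne.symm hx]
        have hp' : (p ++ [loc]).Nodup := by
          rw [List.nodup_append]
          refine ⟨hp, List.nodup_singleton loc, ?_⟩
          intro a ha b hb
          simp only [List.mem_singleton] at hb
          exact fun hab => hm ((hab.trans hb) ▸ ha)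
        have := ih (p ++ [loc]) _ hc' hp'
        rw [hc loc, hcount] at this
        rw [this]
        simp [hu', List.append_assoc]

theorem foldl_add_len_le (xs : List String) : ∀ (s : List String),
    (xs.foldl PySem.Set.add s).length ≤ s.length + xs.length := by
  induction xs with
  | nil => intro s; simp
  | cons x xs ih =>
    intro s
    simp only [List.foldl_cons]
    refine le_trans (ih _) ?_
    unfold PySem.Set.add
    split <;> simp only [List.length_append, List.length_cons, List.length_nil] <;> omega

theorem foldl_add_len_lt (xs : List String) : ∀ (s : List String), s.Nodup →
    (((xs.foldl PySem.Set.add s).length < s.length + xs.length) ↔ ¬ (s ++ xs).Nodup) := by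
  induction xs with
  | nil => intro s hs; simp [hs]
  | cons x xs ih =>
    intro s hs
    simp only [List.foldl_cons]
    by_cases hm : x ∈ s
    · have hadd : PySem.Set.add s x = s := by
        unfold PySem.Set.add
        rw [if_pos ((PySem.Set.contains_iff s x).mpr hm)]
      rw [hadd]
      constructor
      · intro _ hnd
        rcases List.nodup_append.mp hnd with ⟨_, _, hdisj⟩
        exact hdisj x hm x (by simp) rfl
      · intro _
        have := foldl_add_len_le xs s
        simp only [List.length_cons]
        omega
    · have hadd : PySem.Set.add s x = s ++ [x] := by
        unfold PySem.Set.add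
        rw [if_neg (fun h => hm ((PySem.Set.contains_iff s x).mp h))]
      have hs' : (s ++ [x]).Nodup := by
        rw [List.nodup_append]
        refine ⟨hs, List.nodup_singleton x, ?_⟩
        intro a ha b hb
        simp only [List.mem_singleton] at hb
        exact fun hab => hm ((hab.trans hb) ▸ ha)
      have harith : s.length + (x :: xs).length = (s ++ [x]).length + xs.length := by
        simp; omega
      rw [hadd, harith, ih _ hs', List.append_assoc, List.singleton_append]

-- ===== VERDICT (by name: the statement is the Claim_ definition above) =====
theorem doubled_already_spec : Claim_equal_doubled_already := by
  intro history _
  unfold Spec_doubled_already doubled_already doubled_already_alt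
  have hA := pvLoopA_eq history []
      PySem.Dict.empty (by intro x; simp [PySem.Dict.getD_empty]) List.nodup_nil
  simp only [List.nil_append] at hA
  rw [hA]
  set lowers := history.filter (fun x => !(pyStrIsupper x)) with hl
  show (!decide lowers.Nodup) = decide ((PySem.Set.ofList lowers).length < lowers.length)
  rw [PySem.Set.ofList_eq_foldl]
  have := foldl_add_len_lt lowers [] List.nodup_nil
  simp only [List.length_nil, List.nil_append, Nat.zero_add] at this
  by_cases hnd : lowers.Nodup
  · have hle := foldl_add_len_le lowers []
    simp only [decide_eq_false (this.not_left.mpr (by simp [hnd])), hnd, decide_true,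
      Bool.not_true]
  · simp [decide_eq_true (this.mpr hnd), hnd]
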